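-- pv_equiv track=rewrite | github.com/davidg13/consolidate-brokers | brokers/brokers.py | group_records_exact
-- ===== SOURCE A (Python) =====
-- import itertools
--
-- def group_records_exact(records, key_columns):
--     """Collect exact mathes based on a set of key columns
--     params:
--         records - a list of tuples to consolidate
--         key_columns - the columns to collate by (exact matching only)
--     returns (list) - a list of record tuples with a group id prepended to each record
--     """
--     # helper fn to make a sub-tuple for grouping
--     def make_key_for_cols(record):
--         return tuple([record[i] for i in key_columns])
--
--     # use itertools to group by key columns
--     # itertools expects sorted data
--     sorted_records = sorted(records, key=make_key_for_cols)
--     grouped_records = [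
--         list(group) for _, group in itertools.groupby(sorted_records, key=make_key_for_cols)
--     ]
--
--     # make list of tuples with group id appended
--     # TODO: there is probably a more elegant way to do this with iterators
--     records_with_group_ids = []
--     ids = range(len(grouped_records))
--     for id, record_group in zip(ids, grouped_records):
--         for record in record_group:
--             records_with_group_ids.append(tuple([id] + list(record)))
--
--     # return records_with_group_ids
--     return records_with_group_ids
-- ===== SOURCE B (Python) =====
-- def group_records_exact(records, key_columns):
--     """Group records by key columns via a dict of key -> records (one pass),
--     then number the sorted distinct keys and emit each stored group."""
--     groups = {}
--     for record in records:
--         k = tuple(record[i] for i in key_columns)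
--         groups.setdefault(k, []).append(record)
--     out = []
--     for gid, k in enumerate(sorted(groups)):
--         for record in groups[k]:
--             out.append((gid,) + tuple(record))
--     return out
-- ===== Notes on version B (the rewrite author's own statement) =====
-- stated objective: idiomatic
-- what changed: Replaces sort-whole-records + itertools.groupby + an explicit range/zip numbering loop with a single dict pass grouping records by key tuple, then enumerating the sorted distinct keys and emitting each stored group.
import Mathlib
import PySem

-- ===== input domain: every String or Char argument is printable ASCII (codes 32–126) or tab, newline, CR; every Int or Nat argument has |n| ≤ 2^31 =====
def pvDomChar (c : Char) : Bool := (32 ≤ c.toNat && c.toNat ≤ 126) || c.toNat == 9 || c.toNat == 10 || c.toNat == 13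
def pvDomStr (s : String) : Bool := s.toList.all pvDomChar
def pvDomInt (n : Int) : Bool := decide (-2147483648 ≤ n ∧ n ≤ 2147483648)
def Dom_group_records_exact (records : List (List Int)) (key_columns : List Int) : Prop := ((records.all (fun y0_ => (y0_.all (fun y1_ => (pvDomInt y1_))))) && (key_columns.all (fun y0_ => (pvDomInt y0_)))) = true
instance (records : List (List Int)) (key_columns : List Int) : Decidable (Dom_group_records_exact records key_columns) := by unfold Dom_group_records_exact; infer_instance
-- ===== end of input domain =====

-- B groups records into a dict keyed by the key tuple in one pass, then numbers the sorted
-- distinct keys and emits each stored group (idiomatic; return value only, neither mutates).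

-- ===== PORT A =====
-- make_key_for_cols: tuple([record[i] for i in key_columns])
def pvMakeKeyA (key_columns : List Int) (record : List Int) : List Int :=
  key_columns.map (fun i => PySem.List.pyGetD record i 0)

-- itertools.groupby(sorted_records, key=…) made into [list(group) for _, group in …]:
-- split into maximal runs of consecutive records with equal key
def pvGroupRuns (key_columns : List Int) : List (List Int) → List (List (List Int))
  | [] => []
  | x :: xs =>
    let sp := xs.span (fun y => pvMakeKeyA key_columns y == pvMakeKeyA key_columns x)
    (x :: sp.1) :: pvGroupRuns key_columns sp.2
termination_by l => l.length
decreasing_by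
  simp only [List.span_eq_takeWhile_dropWhile]
  exact Nat.lt_succ_of_le (List.length_dropWhile_le _ _)

def group_records_exact (records : List (List Int)) (key_columns : List Int) : List (List Int) :=
  let sorted_records := PySem.List.sorted records (pvMakeKeyA key_columns) false
  let grouped_records := pvGroupRuns key_columns sorted_records
  let ids := PySem.List.pyRange 0 (grouped_records.length : Int) 1
  (ids.zip grouped_records).foldl
    (fun acc p => p.2.foldl (fun acc record => acc ++ [p.1 :: record]) acc) []

-- ===== PORT B =====
def pvMakeKeyB (key_columns : List Int) (record : List Int) : List Int :=
  key_columns.map (fun i => PySem.List.pyGetD record i 0)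

def group_records_exact_alt (records : List (List Int)) (key_columns : List Int) : List (List Int) :=
  let groups := records.foldl
    (fun d record => d.modify (pvMakeKeyB key_columns record) [] (fun g => g ++ [record]))
    PySem.Dict.empty
  let ks := PySem.List.sorted groups.keys (fun x => x) false
  (PySem.List.enumerate ks 0).foldl
    (fun out p => (groups.getD p.2 []).foldl (fun out record => out ++ [p.1 :: record]) out) []

-- ===== PRECONDITION & SPEC =====
-- A raises IndexError iff some key column index is out of range for some record; B raises there too.
def Pre_group_records_exact (records : List (List Int)) (key_columns : List Int) : Prop :=
  ∀ r ∈ records, ∀ i ∈ key_columns, PySem.Raise.InRange r.length i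
instance (records : List (List Int)) (key_columns : List Int) : Decidable (Pre_group_records_exact records key_columns) := by unfold Pre_group_records_exact; infer_instance

def pvWitness_group_records_exact : List (List Int) × List Int :=
  ([[5, 1], [3, 1], [5, 2]], [0])

def Spec_group_records_exact (records : List (List Int)) (key_columns : List Int) (out : List (List Int)) : Prop := out = group_records_exact_alt records key_columns
instance (records : List (List Int)) (key_columns : List Int) (out : List (List Int)) : Decidable (Spec_group_records_exact records key_columns out) := by unfold Spec_group_records_exact; infer_instance

-- ===== CLAIM (what is proved, stated in full; the proofs are below) =====
def Claim_equal_group_records_exact : Prop := ∀ (records : List (List Int)) (key_columns : List Int), Dom_group_records_exact records key_columns → Pre_group_records_exact records key_columns → Spec_group_records_exact records key_columns (group_records_exact records key_columns)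

-- ===== LEMMAS AND PROOFS =====

-- PySem.List.sorted does not depend on which DecidableLT instance is supplied
theorem pv_sorted_di {α κ : Type} [LT κ] (d1 d2 : DecidableLT κ)
    (xs : List α) (key : α → κ) (rev : Bool) :
    @PySem.List.sorted α κ _ d1 xs key rev = @PySem.List.sorted α κ _ d2 xs key rev := by
  have h : d1 = d2 := by
    funext a b
    exact Subsingleton.elim _ _
  rw [h]

-- the sorted distinct keys and the per-key group of records, shared spec of both sides
def pvKeys (records : List (List Int)) (key_columns : List Int) : List (List Int) :=
  PySem.List.sorted (PySem.List.dedup (records.map (pvMakeKeyA key_columns))) (fun x => x) false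

def pvGroup (records : List (List Int)) (key_columns : List Int) (kk : List Int) : List (List Int) :=
  records.filter (fun r => pvMakeKeyA key_columns r == kk)

def pvCanon (records : List (List Int)) (key_columns : List Int) : List (List Int) :=
  (PySem.List.enumerate (pvKeys records key_columns) 0).flatMap
    (fun p => (pvGroup records key_columns p.2).map (p.1 :: ·))

def pvDictB (records : List (List Int)) (key_columns : List Int) :
    PySem.Dict (List Int) (List (List Int)) :=
  records.foldl
    (fun d record => d.modify (pvMakeKeyB key_columns record) [] (fun g => g ++ [record]))
    PySem.Dict.empty

theorem pv_insertBy_skip {α : Type} (before : α → α → Bool) (x : α) (as bs : List α)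
    (h : ∀ a ∈ as, before x a = false) :
    PySem.List.insertBy before x (as ++ bs) = as ++ PySem.List.insertBy before x bs := by
  induction as with
  | nil => simp
  | cons a as ih =>
    have ha := h a (by simp)
    simp [PySem.List.insertBy, ha]
    exact ih (fun a ha => h a (by simp [ha]))

theorem pv_insertBy_front {α : Type} (before : α → α → Bool) (x : α) (bs : List α)
    (h : ∀ b ∈ bs, before x b = true) :
    PySem.List.insertBy before x bs = x :: bs := by
  cases bs with
  | nil => rfl
  | cons b bs => simp [PySem.List.insertBy, h b (by simp)]

theorem pv_insertBy_blocks {α κ : Type} [LinearOrder κ] (key : α → κ) (x : α)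
    (ks : List κ) (F : κ → List α)
    (hks : ks.Pairwise (· < ·)) (hx : key x ∈ ks)
    (hF : ∀ kk, ∀ y ∈ F kk, key y = kk) :
    PySem.List.insertBy (fun a b => decide (key a < key b)) x (ks.flatMap F)
      = ks.flatMap (fun kk => F kk ++ if key x = kk then [x] else []) := by
  induction ks with
  | nil => simp at hx
  | cons kk ks ih =>
    rcases List.pairwise_cons.mp hks with ⟨hlt, hks'⟩
    rcases lt_trichotomy (key x) kk with h | h | h
    · exfalso
      rcases List.mem_cons.mp hx with rfl | hmem
      · exact lt_irrefl _ h
      · exact absurd (h.trans (hlt _ hmem)) (lt_irrefl _)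
    · -- key x = kk : x goes right after the block of kk
      have hskip : ∀ a ∈ F kk, (fun a b => decide (key a < key b)) x a = false := by
        intro a ha; simp [hF kk a ha, h]
      have hfront : ∀ b ∈ ks.flatMap F, (fun a b => decide (key a < key b)) x b = true := by
        intro b hb
        rcases List.mem_flatMap.mp hb with ⟨k', hk', hbF⟩
        simp [hF k' b hbF, h, hlt k' hk']
      have hrest : ks.flatMap (fun kk' => F kk' ++ if key x = kk' then [x] else [])
          = ks.flatMap F := by
        apply List.flatMap_congr
        intro k' hk'
        have hne : key x ≠ k' := by rw [h]; exact ne_of_lt (hlt k' hk')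
        simp [hne]
      simp only [List.flatMap_cons]
      rw [pv_insertBy_skip _ _ _ _ hskip, pv_insertBy_front _ _ _ hfront, hrest, if_pos h]
      simp
    · -- kk < key x : x belongs further right
      have hmem : key x ∈ ks := by
        rcases List.mem_cons.mp hx with rfl | hmem
        · exact absurd h (lt_irrefl _)
        · exact hmem
      have hskip : ∀ a ∈ F kk, (fun a b => decide (key a < key b)) x a = false := by
        intro a ha
        simp [hF kk a ha]
        exact h.le
      have hne : key x ≠ kk := ne_of_gt h
      simp only [List.flatMap_cons]
      rw [pv_insertBy_skip _ _ _ _ hskip, ih hks' hmem, if_neg hne]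
      simp

-- stable sort = concatenation, over any strictly increasing key cover, of the per-key filters
theorem pv_sorted_eq_flatMap_filter {α κ : Type} [LinearOrder κ] [BEq κ] [LawfulBEq κ]
    (key : α → κ) (rs : List α) (ks : List κ)
    (hks : ks.Pairwise (· < ·)) (hall : ∀ r ∈ rs, key r ∈ ks) :
    PySem.List.sorted rs key false
      = ks.flatMap (fun kk => rs.filter (fun r => key r == kk)) := by
  induction rs using List.reverseRecOn with
  | nil => simp [PySem.List.sorted_eq_foldl_insertBy]
  | append_singleton xs x ih =>
    have hxs : ∀ r ∈ xs, key r ∈ ks := fun r hr => hall r (by simp [hr])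
    have hstep : PySem.List.sorted (xs ++ [x]) key false
        = PySem.List.insertBy (fun a b => decide (key a < key b)) x
            (PySem.List.sorted xs key false) := by
      rw [PySem.List.sorted_eq_foldl_insertBy, PySem.List.sorted_eq_foldl_insertBy,
        List.foldl_append]
      rfl
    rw [hstep, ih hxs,
      pv_insertBy_blocks key x ks _ hks (hall x (by simp))
        (fun kk y hy => by simpa using (List.mem_filter.mp hy).2)]
    apply List.flatMap_congr
    intro kk hkk
    rw [List.filter_append]
    by_cases h : key x = kk <;> simp [h]

theorem pv_groupRuns_flatMap (key_columns : List Int) (ks : List (List Int))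
    (F : List Int → List (List Int))
    (hks : ks.Pairwise (· < ·))
    (hne : ∀ kk ∈ ks, F kk ≠ [])
    (hF : ∀ kk, ∀ y ∈ F kk, pvMakeKeyA key_columns y = kk) :
    pvGroupRuns key_columns (ks.flatMap F) = ks.map F := by
  induction ks with
  | nil => simp [pvGroupRuns]
  | cons kk ks ih =>
    rcases List.pairwise_cons.mp hks with ⟨hlt, hks'⟩
    rcases hy : F kk with _ | ⟨y, ys⟩
    · exact absurd hy (hne kk (by simp))
    have hky : pvMakeKeyA key_columns y = kk := hF kk y (by simp [hy])
    have hys : ∀ z ∈ ys, (pvMakeKeyA key_columns z == pvMakeKeyA key_columns y) = true := by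
      intro z hz
      simp [hky, hF kk z (by simp [hy, hz])]
    have htail : ∀ z ∈ ks.flatMap F,
        (pvMakeKeyA key_columns z == pvMakeKeyA key_columns y) = false := by
      intro z hz
      rcases List.mem_flatMap.mp hz with ⟨k', hk', hzF⟩
      have : pvMakeKeyA key_columns z = k' := hF k' z hzF
      have hne' : k' ≠ kk := ne_of_gt (hlt k' hk')
      simp [this, hky, hne']
    simp only [List.flatMap_cons, hy, List.cons_append]
    rw [pvGroupRuns]
    have hspan : (ys ++ ks.flatMap F).span
        (fun z => pvMakeKeyA key_columns z == pvMakeKeyA key_columns y)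
        = (ys, ks.flatMap F) := by
      rw [List.span_eq_takeWhile_dropWhile]
      have ht : (ys ++ ks.flatMap F).takeWhile
          (fun z => pvMakeKeyA key_columns z == pvMakeKeyA key_columns y) = ys := by
        rw [List.takeWhile_append]
        rw [List.takeWhile_eq_self_iff.mpr hys]
        cases hfl : ks.flatMap F with
        | nil => simp
        | cons w ws => simp [htail w (by simp [hfl])]
      have hd : (ys ++ ks.flatMap F).dropWhile
          (fun z => pvMakeKeyA key_columns z == pvMakeKeyA key_columns y) = ks.flatMap F := by
        rw [List.dropWhile_append]
        rw [List.dropWhile_eq_nil_iff.mpr (by intro z hz; simp at hys ⊢; exact hys z hz)]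
        cases hfl : ks.flatMap F with
        | nil => simp
        | cons w ws => simp [htail w (by simp [hfl])]
      simp [ht, hd]
    simp only [hspan]
    rw [ih hks' (fun k hk => hne k (by simp [hk]))]
    simp [hy]

theorem pv_zip_pyRange_enumerate {α : Type} (gs : List α) (s : Int) :
    (PySem.List.pyRange s (s + (gs.length : Int)) 1).zip gs = PySem.List.enumerate gs s := by
  induction gs generalizing s with
  | nil => simp [PySem.List.pyRange]
  | cons g gs ih =>
    have h : s < s + ((g :: gs).length : Int) := by simp only [List.length_cons]; push_cast; omega
    rw [PySem.List.pyRange_one_cons h]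
    have h2 : s + ((g :: gs).length : Int) = (s + 1) + (gs.length : Int) := by simp only [List.length_cons]; push_cast; ring
    rw [h2]
    simpa [List.zip, PySem.List.enumerate] using ih (s + 1)

-- the numbering loop: append id :: record for every record of every group
theorem pv_numbering_loop {α : Type} (f : α → List (List Int)) (pid : α → Int)
    (ps : List α) (acc : List (List Int)) :
    ps.foldl (fun acc p => (f p).foldl (fun acc record => acc ++ [pid p :: record]) acc) acc
      = acc ++ ps.flatMap (fun p => (f p).map (pid p :: ·)) := by
  calc ps.foldl (fun acc p => (f p).foldl (fun acc record => acc ++ [pid p :: record]) acc) acc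
      = ps.foldl (fun acc p => acc ++ (f p).map (pid p :: ·)) acc := by
        apply PySem.List.foldl_congr_mem
        intro a p _
        exact PySem.List.foldl_append_singleton_eq_map _ _ _
    _ = acc ++ ps.flatMap (fun p => (f p).map (pid p :: ·)) :=
        PySem.List.foldl_append_eq_flatMap _ _ _

theorem pv_keys_strict (records : List (List Int)) (key_columns : List Int) :
    (pvKeys records key_columns).Pairwise (· < ·) := by
  unfold pvKeys
  rw [PySem.List.dedup_eq_ofList]
  have h := PySem.List.sorted_ofList_pairwise_lt (κ := List Int)
    (records.map (pvMakeKeyA key_columns))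
  rwa [pv_sorted_di LinearOrder.toDecidableLT (fun a b => a.decidableLT b)] at h

theorem pv_mem_keys (records : List (List Int)) (key_columns : List Int)
    (r : List Int) (hr : r ∈ records) :
    pvMakeKeyA key_columns r ∈ pvKeys records key_columns := by
  unfold pvKeys
  rw [PySem.List.mem_sorted, PySem.List.mem_dedup]
  exact List.mem_map_of_mem hr

-- A computes the canonical form
theorem pv_A_eq_canon (records : List (List Int)) (key_columns : List Int) :
    group_records_exact records key_columns = pvCanon records key_columns := by
  have hsorted : PySem.List.sorted records (pvMakeKeyA key_columns) false
      = (pvKeys records key_columns).flatMap (pvGroup records key_columns) := by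
    unfold pvGroup
    have h := pv_sorted_eq_flatMap_filter (pvMakeKeyA key_columns) records
      (pvKeys records key_columns) (pv_keys_strict records key_columns)
      (pv_mem_keys records key_columns)
    rw [pv_sorted_di LinearOrder.toDecidableLT (fun a b => a.decidableLT b)] at h
    exact h
  have hruns : pvGroupRuns key_columns
        ((pvKeys records key_columns).flatMap (pvGroup records key_columns))
      = (pvKeys records key_columns).map (pvGroup records key_columns) := by
    apply pv_groupRuns_flatMap key_columns _ _ (pv_keys_strict records key_columns)
    · intro kk hkk
      unfold pvKeys at hkk
      rw [PySem.List.mem_sorted, PySem.List.mem_dedup] at hkk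
      rcases List.mem_map.mp hkk with ⟨r, hr, rfl⟩
      intro hempty
      have : r ∈ pvGroup records key_columns (pvMakeKeyA key_columns r) :=
        List.mem_filter.mpr ⟨hr, by simp⟩
      simp [hempty] at this
    · intro kk y hy
      simpa using (List.mem_filter.mp hy).2
  show (((PySem.List.pyRange 0
        (((pvGroupRuns key_columns (PySem.List.sorted records (pvMakeKeyA key_columns) false)).length : Int)) 1).zip
        (pvGroupRuns key_columns (PySem.List.sorted records (pvMakeKeyA key_columns) false))).foldl
        (fun acc p => p.2.foldl (fun acc record => acc ++ [p.1 :: record]) acc) [])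
      = pvCanon records key_columns
  rw [hsorted, hruns, pv_numbering_loop (fun p : Int × List (List Int) => p.2) (fun p => p.1)]
  have hz : (PySem.List.pyRange 0
        ((((pvKeys records key_columns).map (pvGroup records key_columns)).length : Int)) 1).zip
        ((pvKeys records key_columns).map (pvGroup records key_columns))
      = PySem.List.enumerate ((pvKeys records key_columns).map (pvGroup records key_columns)) 0 := by
    have := pv_zip_pyRange_enumerate
      ((pvKeys records key_columns).map (pvGroup records key_columns)) 0
    simpa using this
  rw [hz]
  simp only [List.nil_append]
  have hmap : PySem.List.enumerate ((pvKeys records key_columns).map (pvGroup records key_columns)) 0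
      = (PySem.List.enumerate (pvKeys records key_columns) 0).map
          (fun p => (p.1, pvGroup records key_columns p.2)) := by
    generalize pvKeys records key_columns = ks
    generalize (0 : Int) = s
    induction ks generalizing s with
    | nil => simp [PySem.List.enumerate]
    | cons k ks ih => simp [PySem.List.enumerate, ih]
  rw [hmap, List.flatMap_map]
  rfl

-- B computes the canonical form
theorem pv_B_eq_canon (records : List (List Int)) (key_columns : List Int) :
    group_records_exact_alt records key_columns = pvCanon records key_columns := by
  have hkeyeq : pvMakeKeyB = pvMakeKeyA := rfl
  have hfold : pvDictB records key_columns
      = (records.map (fun r => (pvMakeKeyB key_columns r, r))).foldl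
          (fun d p => d.modify p.1 [] (fun g => g ++ [p.2])) PySem.Dict.empty := by
    unfold pvDictB
    rw [List.foldl_map]
  have hgetD : ∀ kk, (pvDictB records key_columns).getD kk []
      = pvGroup records key_columns kk := by
    intro kk
    rw [hfold]
    rw [PySem.Dict.getD_foldl_modify_append]
    rw [PySem.Dict.getD_empty, List.filter_map, List.map_map]
    unfold pvGroup
    rw [hkeyeq]
    simp [Function.comp_def]
  have hks : PySem.List.sorted (pvDictB records key_columns).keys (fun x => x) false
      = pvKeys records key_columns := by
    unfold pvDictB
    rw [PySem.Dict.keys_foldl_modify_key records (pvMakeKeyB key_columns) [] _ PySem.Dict.empty]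
    rw [PySem.Dict.keys_empty, PySem.Set.update_nil_left, hkeyeq]
    unfold pvKeys
    rw [PySem.List.dedup_eq_ofList]
  show ((PySem.List.enumerate
        (PySem.List.sorted (pvDictB records key_columns).keys (fun x => x) false) 0).foldl
        (fun out p => ((pvDictB records key_columns).getD p.2 []).foldl
          (fun out record => out ++ [p.1 :: record]) out) [])
      = pvCanon records key_columns
  rw [hks, pv_numbering_loop (fun p : Int × List Int => (pvDictB records key_columns).getD p.2 [])
    (fun p => p.1)]
  simp only [List.nil_append]
  unfold pvCanon
  apply List.flatMap_congr
  intro p hp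
  rw [hgetD p.2]

-- ===== VERDICT (by name: the statement is the Claim_ definition above) =====
theorem group_records_exact_spec : Claim_equal_group_records_exact := by
  intro records key_columns _ _
  unfold Spec_group_records_exact
  rw [pv_A_eq_canon, pv_B_eq_canon]
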